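-- pv_equiv track=rewrite | github.com/ChanHoLee275/backjoon | Greedy/1541.py | solution
-- ===== SOURCE A (Python) =====
-- def sumOfNumbers(chunk):
--     return sum(list(map(int,chunk.split('+'))))
--
-- def solution(formula):
--     answer = 0
--     chuncks = formula.split('-')
--     first_chunck = chuncks.pop(0)
--     answer += sumOfNumbers(first_chunck)
--     for i in chuncks:
--         answer -= sumOfNumbers(i)
--     return answer
-- ===== SOURCE B (Python) =====
-- def solution(formula):
--     result = 0
--     num = ''
--     sign = 1
--     for ch in formula:
--         if ch == '+':
--             result += sign * int(num)
--             num = ''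
--         elif ch == '-':
--             result += sign * int(num)
--             num = ''
--             sign = -1
--         else:
--             num += ch
--     return result + sign * int(num)
-- ===== Notes on version B (the rewrite author's own statement) =====
-- stated objective: alternative
-- what changed: Replaces the nested split('-')/split('+') passes and per-chunk summation with a single left-to-right character scan carrying (result, current token, sign).
import Mathlib
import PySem

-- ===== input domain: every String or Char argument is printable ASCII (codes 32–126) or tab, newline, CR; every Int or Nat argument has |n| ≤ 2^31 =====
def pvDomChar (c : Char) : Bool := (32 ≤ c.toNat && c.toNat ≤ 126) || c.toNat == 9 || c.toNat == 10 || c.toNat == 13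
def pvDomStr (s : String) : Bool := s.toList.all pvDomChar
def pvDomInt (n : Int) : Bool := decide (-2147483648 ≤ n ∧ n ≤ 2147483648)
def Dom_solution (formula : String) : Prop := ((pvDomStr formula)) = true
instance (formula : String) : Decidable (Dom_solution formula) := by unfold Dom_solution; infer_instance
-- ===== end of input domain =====

-- B replaces the nested split('-')/split('+') passes with a single left-to-right
-- character scan carrying (result, current token, sign): a different decomposition, same cost.

-- int(t); Pre_solution guarantees the parse succeeds (Python raises ValueError where it is none)
def pvTok (t : List Char) : Int := (PySem.Int.ofChars? t).getD 0

-- ===== PORT A =====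
def sumOfNumbers (chunk : List Char) : Int :=
  ((PySem.Chars.splitOn chunk ['+']).map pvTok).sum

def solution (formula : String) : Int :=
  let chuncks := PySem.Chars.splitOn formula.toList ['-']
  -- chuncks.pop(0): str.split never returns an empty list, so headI/tail is exact here
  let first_chunck := chuncks.headI
  let answer := 0 + sumOfNumbers first_chunck
  chuncks.tail.foldl (fun a i => a - sumOfNumbers i) answer

-- ===== PORT B =====
def pvStep (st : Int × List Char × Int) (ch : Char) : Int × List Char × Int :=
  if ch = '+' then (st.1 + st.2.2 * pvTok st.2.1, [], st.2.2)
  else if ch = '-' then (st.1 + st.2.2 * pvTok st.2.1, [], -1)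
  else (st.1, st.2.1 ++ [ch], st.2.2)

def solution_alt (formula : String) : Int :=
  let st := formula.toList.foldl pvStep (0, [], 1)
  st.1 + st.2.2 * pvTok st.2.1

-- ===== PRECONDITION & SPEC =====
-- Pre_: every substring between consecutive '+'/'-' operators parses as a Python int
-- (otherwise A raises ValueError in int()).
def Pre_solution (formula : String) : Prop :=
  ((PySem.Chars.splitOn formula.toList ['-']).all fun chunk =>
    (PySem.Chars.splitOn chunk ['+']).all fun t => (PySem.Int.ofChars? t).isSome) = true
instance (formula : String) : Decidable (Pre_solution formula) := by
  unfold Pre_solution; infer_instance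

def pvWitness_solution : String := "55-50+40"

def Spec_solution (formula : String) (out : Int) : Prop := out = solution_alt formula
instance (formula : String) (out : Int) : Decidable (Spec_solution formula out) := by
  unfold Spec_solution; infer_instance

-- ===== CLAIM (what is proved, stated in full; the proofs are below) =====
def Claim_equal_solution : Prop :=
  ∀ (formula : String), Dom_solution formula → Pre_solution formula →
    Spec_solution formula (solution formula)

-- ===== LEMMAS AND PROOFS =====

-- simple recursive characterization of single-character str.split
def splitRec (s : Char) : List Char → List (List Char)
  | [] => [[]]
  | c :: cs => if c = s then [] :: splitRec s cs else (splitRec s cs).modifyHead (c :: ·)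

theorem splitRec_cons_ex (s : Char) (l : List Char) : ∃ h t, splitRec s l = h :: t := by
  induction l with
  | nil => exact ⟨[], [], rfl⟩
  | cons c cs ih =>
      obtain ⟨h, t, e⟩ := ih
      by_cases hc : c = s <;> simp [splitRec, hc, e]

theorem splitOn_go_eq : ∀ (s : Char) (l : List Char) (fuel : Nat) (cur : List Char)
    (acc : List (List Char)), l.length < fuel →
    PySem.Chars.splitOn.go [s] fuel l cur acc
      = acc.reverse ++ (splitRec s l).modifyHead (cur.reverse ++ ·)
  | s, [], fuel+1, cur, acc, _ => by
      simp [PySem.Chars.splitOn.go, splitRec]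
  | s, c :: rest, fuel+1, cur, acc, h => by
      have h' : rest.length < fuel := by simpa using h
      by_cases hc : c = s
      · subst hc
        have hp : [c].isPrefixOf (c :: rest) = true := by simp [List.isPrefixOf]
        rw [PySem.Chars.splitOn.go]
        simp only [hp, if_pos, List.length_cons, List.length_nil, Nat.zero_add,
          List.drop_one, List.tail_cons]
        rw [splitOn_go_eq c rest fuel [] (cur.reverse :: acc) h']
        obtain ⟨hd, tl, e⟩ := splitRec_cons_ex c rest
        simp [splitRec, e, List.modifyHead]
      · have hp : [s].isPrefixOf (c :: rest) = false := by
          simp [List.isPrefixOf]; exact fun h => hc h.symm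
        rw [PySem.Chars.splitOn.go]
        simp only [hp, Bool.false_eq_true, if_false]
        rw [splitOn_go_eq s rest fuel (c :: cur) acc h']
        obtain ⟨hd, tl, e⟩ := splitRec_cons_ex s rest
        simp [splitRec, hc, e, List.modifyHead]

theorem splitOn_eq_splitRec (s : Char) (l : List Char) :
    PySem.Chars.splitOn l [s] = splitRec s l := by
  rw [PySem.Chars.splitOn, splitOn_go_eq s l (l.length + 1) [] [] (by omega)]
  obtain ⟨hd, tl, e⟩ := splitRec_cons_ex s l
  simp [e, List.modifyHead]

-- token sums over the split structure
def plusSum (c : List Char) : Int := ((splitRec '+' c).map pvTok).sum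
def plusSumP (num c : List Char) : Int :=
  (((splitRec '+' c).modifyHead (num ++ ·)).map pvTok).sum
def negAv (num cs : List Char) : Int :=
  plusSumP num ((splitRec '-' cs).headI) + (((splitRec '-' cs).tail).map plusSum).sum
def AvalP (num cs : List Char) : Int :=
  plusSumP num ((splitRec '-' cs).headI) - (((splitRec '-' cs).tail).map plusSum).sum

theorem plusSumP_nil (c : List Char) : plusSumP [] c = plusSum c := by
  obtain ⟨hd, tl, e⟩ := splitRec_cons_ex '+' c
  simp [plusSumP, plusSum, e, List.modifyHead]

theorem plusSumP_empty (num : List Char) : plusSumP num [] = pvTok num := by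
  simp [plusSumP, splitRec, List.modifyHead]

theorem plusSumP_plus (num c : List Char) :
    plusSumP num ('+' :: c) = pvTok num + plusSumP [] c := by
  obtain ⟨hd, tl, e⟩ := splitRec_cons_ex '+' c
  simp [plusSumP, splitRec, e, List.modifyHead]

theorem plusSumP_char (num : List Char) (ch : Char) (c : List Char) (h : ch ≠ '+') :
    plusSumP num (ch :: c) = plusSumP (num ++ [ch]) c := by
  obtain ⟨hd, tl, e⟩ := splitRec_cons_ex '+' c
  simp [plusSumP, splitRec, h, e, List.modifyHead]

def pvFin (st : Int × List Char × Int) : Int := st.1 + st.2.2 * pvTok st.2.1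

theorem negLoop (cs : List Char) : ∀ (num : List Char) (r : Int),
    pvFin (cs.foldl pvStep (r, num, -1)) = r - negAv num cs := by
  induction cs with
  | nil =>
      intro num r
      simp [pvFin, negAv, splitRec, plusSumP_empty]; ring
  | cons ch cs ih =>
      intro num r
      by_cases hp : ch = '+'
      · subst hp
        obtain ⟨hd, tl, e⟩ := splitRec_cons_ex '-' cs
        simp only [List.foldl_cons, pvStep, if_pos]
        rw [ih [] (r + -1 * pvTok num)]
        simp [negAv, splitRec, e, List.modifyHead, plusSumP_plus]; ring
      · by_cases hm : ch = '-'
        · subst hm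
          obtain ⟨hd, tl, e⟩ := splitRec_cons_ex '-' cs
          simp only [List.foldl_cons, pvStep, reduceIte]
          rw [if_neg hp, ih [] (r + -1 * pvTok num)]
          simp [negAv, splitRec, e, plusSumP_empty, plusSumP_nil]; ring
        · obtain ⟨hd, tl, e⟩ := splitRec_cons_ex '-' cs
          simp only [List.foldl_cons, pvStep, if_neg hp, if_neg hm]
          rw [ih (num ++ [ch]) r]
          simp [negAv, splitRec, hm, e, List.modifyHead, plusSumP_char _ _ _ hp]

theorem posLoop (cs : List Char) : ∀ (num : List Char) (r : Int),
    pvFin (cs.foldl pvStep (r, num, 1)) = r + AvalP num cs := by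
  induction cs with
  | nil =>
      intro num r
      simp [pvFin, AvalP, splitRec, plusSumP_empty]
  | cons ch cs ih =>
      intro num r
      by_cases hp : ch = '+'
      · subst hp
        obtain ⟨hd, tl, e⟩ := splitRec_cons_ex '-' cs
        simp only [List.foldl_cons, pvStep, if_pos]
        rw [ih [] (r + 1 * pvTok num)]
        simp [AvalP, splitRec, e, List.modifyHead, plusSumP_plus]; ring
      · by_cases hm : ch = '-'
        · subst hm
          obtain ⟨hd, tl, e⟩ := splitRec_cons_ex '-' cs
          simp only [List.foldl_cons, pvStep, reduceIte]
          rw [if_neg hp, negLoop cs [] (r + 1 * pvTok num)]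
          simp [AvalP, negAv, splitRec, e, plusSumP_empty, plusSumP_nil]
          ring
        · obtain ⟨hd, tl, e⟩ := splitRec_cons_ex '-' cs
          simp only [List.foldl_cons, pvStep, if_neg hp, if_neg hm]
          rw [ih (num ++ [ch]) r]
          simp [AvalP, splitRec, hm, e, List.modifyHead, plusSumP_char _ _ _ hp]

theorem foldl_sub (l : List (List Char)) : ∀ (a : Int),
    l.foldl (fun a i => a - sumOfNumbers i) a = a - (l.map sumOfNumbers).sum := by
  induction l with
  | nil => intro a; simp
  | cons h t ih => intro a; simp [ih]; ring

theorem sumOfNumbers_eq (c : List Char) : sumOfNumbers c = plusSum c := by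
  simp [sumOfNumbers, plusSum, splitOn_eq_splitRec]

-- ===== VERDICT (by name: the statement is the Claim_ definition above) =====
theorem solution_spec : Claim_equal_solution := by
  intro formula _ _
  unfold Spec_solution solution
  have hb : solution_alt formula = pvFin (formula.toList.foldl pvStep (0, [], 1)) := rfl
  rw [hb, posLoop]
  obtain ⟨hd, tl, e⟩ := splitRec_cons_ex '-' formula.toList
  rw [splitOn_eq_splitRec]
  simp only [AvalP, e, List.headI, List.tail_cons, plusSumP_nil, foldl_sub]
  rw [show sumOfNumbers = plusSum from funext sumOfNumbers_eq]
  ring
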